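-- pv_equiv track=rewrite | github.com/travisekarr/tailored-resume | pages/02_jobs_report.py | search_filter
-- ===== SOURCE A (Python) =====
-- def search_filter(rows, q: str):
--     if not q:
--         return rows
--     q = q.lower().strip()
--     out = []
--     for r in rows:
--         blob = " ".join(
--             str(r.get(k, "")) for k in ("title", "company", "location", "description", "url")
--         ).lower()
--         if all(part in blob for part in q.split()):
--             out.append(r)
--     return out
-- ===== SOURCE B (Python) =====
-- def search_filter(rows, q: str):
--     if not q:
--         return rows
--     q = q.lower().strip()
--     keys = ("title", "company", "location", "description", "url")
--     candidates = [
--         (r, " ".join(str(r.get(k, "")) for k in keys).lower()) for r in rows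
--     ]
--     for tok in q.split():
--         candidates = [p for p in candidates if tok in p[1]]
--     return [r for r, _ in candidates]
-- ===== Notes on version B (the rewrite author's own statement) =====
-- stated objective: alternative
-- what changed: B precomputes (row, blob) pairs in one pass and then narrows that candidate list token by token with successive filters, instead of A's single loop that rebuilds the token check per row with all(); same result, different shape.
import Mathlib
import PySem

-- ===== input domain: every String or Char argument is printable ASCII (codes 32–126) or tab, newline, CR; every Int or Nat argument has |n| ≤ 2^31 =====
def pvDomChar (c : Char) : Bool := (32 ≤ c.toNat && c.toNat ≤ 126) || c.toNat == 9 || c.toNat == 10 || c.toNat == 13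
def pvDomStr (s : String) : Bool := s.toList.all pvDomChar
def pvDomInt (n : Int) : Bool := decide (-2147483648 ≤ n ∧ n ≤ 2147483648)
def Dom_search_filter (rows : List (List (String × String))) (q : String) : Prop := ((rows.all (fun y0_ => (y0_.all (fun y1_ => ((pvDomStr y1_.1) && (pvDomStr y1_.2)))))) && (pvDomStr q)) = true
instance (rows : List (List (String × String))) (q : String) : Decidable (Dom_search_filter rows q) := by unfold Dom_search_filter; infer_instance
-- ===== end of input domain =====

-- B builds (row, blob) pairs once and narrows that candidate list token by token; same result as A's per-row all() loop.

-- ===== PORT A =====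
-- blob = " ".join(str(r.get(k, "")) for k in ("title","company","location","description","url")).lower()
def pvBlob (r : List (String × String)) : String :=
  PySem.Str.lower (PySem.Str.join " "
    (["title", "company", "location", "description", "url"].map
      (fun k => (PySem.Dict.mk r).getD k "")))

def search_filter (rows : List (List (String × String))) (q : String) : List (List (String × String)) :=
  if q = "" then rows
  else
    let q' := PySem.Str.strip (PySem.Str.lower q)
    rows.foldl (fun out r =>
      let blob := pvBlob r
      if (PySem.Str.split₀ q').all (fun part => PySem.Str.isIn part blob) then out ++ [r]
      else out) []

-- ===== PORT B =====
def search_filter_alt (rows : List (List (String × String))) (q : String) : List (List (String × String)) :=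
  if q = "" then rows
  else
    let toks := PySem.Str.split₀ (PySem.Str.strip (PySem.Str.lower q))
    let candidates := rows.map (fun r => (r, pvBlob r))
    let survivors := toks.foldl (fun cand tok => cand.filter (fun p => PySem.Str.isIn tok p.2)) candidates
    survivors.map (fun p => p.1)

-- ===== PRECONDITION & SPEC =====
def Spec_search_filter (rows : List (List (String × String))) (q : String) (out : List (List (String × String))) : Prop := out = search_filter_alt rows q
instance (rows : List (List (String × String))) (q : String) (out : List (List (String × String))) : Decidable (Spec_search_filter rows q out) := by unfold Spec_search_filter; infer_instance

-- ===== CLAIM (what is proved, stated in full; the proofs are below) =====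
def Claim_equal_search_filter : Prop := ∀ (rows : List (List (String × String))) (q : String), Dom_search_filter rows q → Spec_search_filter rows q (search_filter rows q)

-- ===== LEMMAS AND PROOFS =====

-- successive filters over the token list = one filter by the conjunction of all tokens
theorem foldl_filter_eq_filter_all {α β : Type} (f : β → α → Bool) (toks : List β) (ps : List α) :
    toks.foldl (fun cand tok => cand.filter (fun p => f tok p)) ps
      = ps.filter (fun p => toks.all (fun tok => f tok p)) := by
  induction toks generalizing ps with
  | nil => simp
  | cons t ts ih =>
    simp only [List.foldl_cons, ih, List.filter_filter, List.all_cons]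
    congr 1
    funext p
    exact Bool.and_comm _ _

-- filtering tagged pairs by a predicate on the tag, then projecting, = filtering the rows
theorem map_fst_filter_snd {α β : Type} (g : α → β) (p : β → Bool) (rows : List α) :
    (((rows.map (fun r => (r, g r))).filter (fun q => p q.2)).map (fun q => q.1))
      = rows.filter (fun r => p (g r)) := by
  induction rows with
  | nil => rfl
  | cons r rs ih =>
    by_cases h : p (g r) <;> simp [h, ih]

theorem search_filter_spec : Claim_equal_search_filter := by
  intro rows q _
  unfold Spec_search_filter search_filter search_filter_alt
  by_cases hq : q = ""
  · simp [hq]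
  · simp only [hq, ite_false]
    rw [PySem.List.foldl_append_if_eq_filter, foldl_filter_eq_filter_all,
      map_fst_filter_snd pvBlob
        (fun b => (PySem.Str.split₀ (PySem.Str.strip (PySem.Str.lower q))).all
          (fun tok => PySem.Str.isIn tok b)) rows]
    simp
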